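-- pv_equiv track=rewrite | github.com/maniczko/kindleMaster | chess_diagram_renderer.py | _find_border_band
-- ===== SOURCE A (Python) =====
-- def _contiguous_groups(indices: list[int]) -> list[tuple[int, int]]:
--     if not indices:
--         return []
--
--     groups = []
--     start = indices[0]
--     prev = indices[0]
--     for idx in indices[1:]:
--         if idx == prev + 1:
--             prev = idx
--             continue
--         groups.append((start, prev))
--         start = idx
--         prev = idx
--     groups.append((start, prev))
--     return groups
--
-- def _find_border_band(
--     counts: list[int],
--     runs: list[int],
--     minimum_count: int,
--     minimum_run: int,
-- ) -> tuple[tuple[int, int], tuple[int, int]] | None: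
--     """Find the first and last contiguous border bands for board lines."""
--     candidates = [
--         idx for idx, (count, run) in enumerate(zip(counts, runs))
--         if count >= minimum_count and run >= minimum_run
--     ]
--     groups = _contiguous_groups(candidates)
--     if len(groups) < 2:
--         return None
--     return groups[0], groups[-1]
-- ===== SOURCE B (Python) =====
-- def _find_border_band(
--     counts: list[int],
--     runs: list[int],
--     minimum_count: int,
--     minimum_run: int,
-- ) -> tuple[tuple[int, int], tuple[int, int]] | None:
--     """Find the first and last contiguous border bands for board lines."""
--     first = last = None
--     start = None
--     groups = 0
--     i = -1
--     for i, (count, run) in enumerate(zip(counts, runs)):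
--         if count >= minimum_count and run >= minimum_run:
--             if start is None:
--                 start = i
--         elif start is not None:
--             band = (start, i - 1)
--             if first is None:
--                 first = band
--             last = band
--             groups += 1
--             start = None
--     if start is not None:
--         band = (start, i)
--         if first is None:
--             first = band
--         last = band
--         groups += 1
--     if groups < 2:
--         return None
--     return first, last
-- ===== Notes on version B (the rewrite author's own statement) =====
-- stated objective: simpler
-- what changed: Replaces the two-phase candidates-list + _contiguous_groups helper with one fused pass over enumerate(zip(counts, runs)) that keeps only the first band, the last band and a group counter, dropping the intermediate candidates list and the helper entirely.
import Mathlib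
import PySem

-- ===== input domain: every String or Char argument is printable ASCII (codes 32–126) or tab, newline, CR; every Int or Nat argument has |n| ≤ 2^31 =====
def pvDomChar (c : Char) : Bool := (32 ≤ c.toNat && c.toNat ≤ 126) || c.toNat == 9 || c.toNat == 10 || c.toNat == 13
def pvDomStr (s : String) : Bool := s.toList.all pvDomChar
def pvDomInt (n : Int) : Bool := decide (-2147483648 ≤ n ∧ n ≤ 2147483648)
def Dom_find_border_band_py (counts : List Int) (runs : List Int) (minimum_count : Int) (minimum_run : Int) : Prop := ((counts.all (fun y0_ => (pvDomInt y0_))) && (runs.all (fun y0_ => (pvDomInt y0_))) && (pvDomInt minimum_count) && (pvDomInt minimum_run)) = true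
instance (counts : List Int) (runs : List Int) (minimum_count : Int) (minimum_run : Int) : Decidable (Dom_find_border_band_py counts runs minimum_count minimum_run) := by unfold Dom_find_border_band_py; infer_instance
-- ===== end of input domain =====

-- B replaces A's candidates-list + _contiguous_groups two-phase structure with a single fused
-- pass keeping only the first band, the last band and a group counter (objective: simpler).

-- ===== PORT A =====

-- loop body of _contiguous_groups' for-loop, state (groups, start, prev)
def cgStep (s : List (Int × Int) × Int × Int) (idx : Int) : List (Int × Int) × Int × Int :=
  if idx = s.2.2 + 1 then (s.1, s.2.1, idx)
  else (s.1 ++ [(s.2.1, s.2.2)], idx, idx)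

def contiguous_groups_py (indices : List Int) : List (Int × Int) :=
  match indices with
  | [] => []
  | i0 :: rest =>
    let st := rest.foldl cgStep ([], i0, i0)
    st.1 ++ [(st.2.1, st.2.2)]

def find_border_band_py (counts : List Int) (runs : List Int) (minimum_count : Int) (minimum_run : Int) : Option ((Int × Int) × (Int × Int)) :=
  let candidates : List Int :=
    (PySem.List.enumerate (counts.zip runs)).foldl
      (fun acc p => if p.2.1 ≥ minimum_count ∧ p.2.2 ≥ minimum_run then acc ++ [p.1] else acc) []
  let groups := contiguous_groups_py candidates
  if groups.length < 2 then none
  else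
    match PySem.List.pyGet? groups 0, PySem.List.pyGet? groups (-1) with
    | some g0, some g1 => some (g0, g1)
    | _, _ => none  -- unreachable: groups has length ≥ 2

-- ===== PORT B =====

-- loop body of B's fused pass, state (first, last, start, groups, i)
def bStep (minimum_count minimum_run : Int)
    (s : Option (Int × Int) × Option (Int × Int) × Option Int × Int × Int)
    (p : Int × (Int × Int)) : Option (Int × Int) × Option (Int × Int) × Option Int × Int × Int :=
  match s, p with
  | (first, last, start, groups, _i), (i, (c, r)) =>
    if c ≥ minimum_count ∧ r ≥ minimum_run then
      match start with
      | none => (first, last, some i, groups, i)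
      | some _ => (first, last, start, groups, i)
    else
      match start with
      | some st =>
        let band := (st, i - 1)
        ((if first = none then some band else first), some band, none, groups + 1, i)
      | none => (first, last, none, groups, i)

def bFinish (s : Option (Int × Int) × Option (Int × Int) × Option Int × Int × Int) :
    Option ((Int × Int) × (Int × Int)) :=
  match s with
  | (first, last, start, groups, i) =>
    let (first, last, groups) :=
      match start with
      | some st =>
        let band := (st, i)
        ((if first = none then some band else first), some band, groups + 1)
      | none => (first, last, groups)
    if groups < 2 then none
    else
      match first with
      | some f =>
        match last with
        | some l => some (f, l)
        | none => none  -- unreachable: groups >= 2 forces last set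
      | none => none  -- unreachable: groups >= 2 forces first set

def find_border_band_py_alt (counts : List Int) (runs : List Int) (minimum_count : Int) (minimum_run : Int) : Option ((Int × Int) × (Int × Int)) :=
  bFinish ((PySem.List.enumerate (counts.zip runs)).foldl
      (bStep minimum_count minimum_run) (none, none, none, 0, -1))

-- ===== PRECONDITION & SPEC =====
def Spec_find_border_band_py (counts : List Int) (runs : List Int) (minimum_count : Int) (minimum_run : Int) (out : Option ((Int × Int) × (Int × Int))) : Prop := out = find_border_band_py_alt counts runs minimum_count minimum_run
instance (counts : List Int) (runs : List Int) (minimum_count : Int) (minimum_run : Int) (out : Option ((Int × Int) × (Int × Int))) : Decidable (Spec_find_border_band_py counts runs minimum_count minimum_run out) := by unfold Spec_find_border_band_py; infer_instance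

-- ===== CLAIM (what is proved, stated in full; the proofs are below) =====
def Claim_equal_find_border_band_py : Prop := ∀ (counts : List Int) (runs : List Int) (minimum_count : Int) (minimum_run : Int), Dom_find_border_band_py counts runs minimum_count minimum_run → Spec_find_border_band_py counts runs minimum_count minimum_run (find_border_band_py counts runs minimum_count minimum_run)

-- ===== LEMMAS AND PROOFS =====

-- the qualifying indices of l, where l's first element has index n
def cands (mc mr : Int) : List (Int × Int) → Int → List Int
  | [], _ => []
  | x :: t, n => if x.1 ≥ mc ∧ x.2 ≥ mr then n :: cands mc mr t (n + 1) else cands mc mr t (n + 1)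

-- A's candidate-building foldl computes `cands`
theorem cands_foldl (mc mr : Int) (l : List (Int × Int)) (n : Int) (acc : List Int) :
    (PySem.List.enumerate l n).foldl
      (fun acc p => if p.2.1 ≥ mc ∧ p.2.2 ≥ mr then acc ++ [p.1] else acc) acc
      = acc ++ cands mc mr l n := by
  induction l generalizing n acc with
  | nil => simp [PySem.List.enumerate_nil, cands]
  | cons x t ih =>
    simp only [PySem.List.enumerate_cons, List.foldl_cons, cands]
    by_cases h : x.1 ≥ mc ∧ x.2 ≥ mr
    · simp [h, ih]
    · simp [h, ih]

-- state of A's _contiguous_groups fold on a nonempty list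
def AS : List Int → Option (List (Int × Int) × Int × Int)
  | [] => none
  | c :: r => some (r.foldl cgStep ([], c, c))

theorem getD_getLast?_cons (t : List Int) (a p : Int) :
    t.getLast?.getD a = (a :: t).getLast?.getD p := by
  cases t with
  | nil => simp
  | cons b t' =>
    rw [List.getLast?_cons_cons]
    cases h : (b :: t').getLast? with
    | none => simp at h
    | some v => simp

theorem AS_prev (r : List Int) (g0 : List (Int × Int)) (s0 p0 : Int) :
    (r.foldl cgStep (g0, s0, p0)).2.2 = r.getLast?.getD p0 := by
  induction r generalizing g0 s0 p0 with
  | nil => rfl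
  | cons a t ih =>
    simp only [List.foldl_cons, cgStep]
    split <;> rw [ih] <;> exact getD_getLast?_cons t a p0

theorem AS_snoc (cs : List Int) (n : Int) :
    AS (cs ++ [n]) = some (match AS cs with
      | none => ([], n, n)
      | some gsp => cgStep gsp n) := by
  cases cs with
  | nil => rfl
  | cons c r => simp [AS, List.foldl_append]

-- abstraction: B's fold state as a function of the candidates seen so far and the next index n
def absB : List Int → Int → Option (Int × Int) × Option (Int × Int) × Option Int × Int × Int
  | cs, n =>
    match AS cs with
    | none => (none, none, none, 0, n - 1)
    | some (g, s, p) =>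
      if p = n - 1 then (g.head?, g.getLast?, some s, (g.length : Int), n - 1)
      else ((g ++ [(s, p)]).head?, (g ++ [(s, p)]).getLast?, none, (g.length : Int) + 1, n - 1)

theorem head?_append_singleton {α : Type} (g : List α) (x : α) :
    (g ++ [x]).head? = if g.head? = none then some x else g.head? := by
  cases g <;> simp

theorem AS_prev_lt (cs : List Int) (n : Int) (hlt : ∀ a ∈ cs, a < n)
    (g : List (Int × Int)) (s p : Int) (h : AS cs = some (g, s, p)) : p < n := by
  cases cs with
  | nil => simp [AS] at h
  | cons c r =>
    simp only [AS, Option.some.injEq] at h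
    have h2 := AS_prev r [] c c
    rw [h] at h2
    simp only at h2
    cases hr : r.getLast? with
    | none =>
      rw [hr] at h2; simp at h2
      rw [h2]; exact hlt c (by simp)
    | some a =>
      rw [hr] at h2; simp at h2
      rw [h2]; exact hlt a (List.mem_cons_of_mem _ (List.mem_of_getLast? hr))

-- one step of B's fold preserves the abstraction
theorem bStep_abs (mc mr : Int) (x : Int × Int) (cs : List Int) (n : Int)
    (hlt : ∀ a ∈ cs, a < n) :
    bStep mc mr (absB cs n) (n, x)
      = absB (cs ++ (if x.1 ≥ mc ∧ x.2 ≥ mr then [n] else [])) (n + 1) := by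
  by_cases hq : x.1 ≥ mc ∧ x.2 ≥ mr
  · simp only [hq]
    cases hAS : AS cs with
    | none => simp [absB, hAS, bStep, hq, AS_snoc]
    | some gsp =>
      obtain ⟨g, s, p⟩ := gsp
      have hp := AS_prev_lt cs n hlt g s p hAS
      by_cases hopen : p = n - 1
      · simp [absB, hAS, AS_snoc, bStep, hq, hopen, cgStep]
      · have hne : ¬ n = p + 1 := by omega
        simp [absB, hAS, AS_snoc, bStep, hq, hopen, cgStep, hne]
  · simp only [hq]
    cases hAS : AS cs with
    | none => simp [absB, hAS, bStep, hq]
    | some gsp =>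
      obtain ⟨g, s, p⟩ := gsp
      have hp := AS_prev_lt cs n hlt g s p hAS
      by_cases hopen : p = n - 1
      · simp [absB, hAS, bStep, hq, hopen]
        cases g <;> simp
      · simp [absB, hAS, bStep, hq, hopen]
        omega

-- B's fold over the rest of the input, from an abstracted state
theorem bFold_abs (mc mr : Int) (t : List (Int × Int)) (n : Int) (cs : List Int)
    (hlt : ∀ a ∈ cs, a < n) :
    (PySem.List.enumerate t n).foldl (bStep mc mr) (absB cs n)
      = absB (cs ++ cands mc mr t n) (n + t.length) := by
  induction t generalizing n cs with
  | nil => simp [PySem.List.enumerate_nil, cands]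
  | cons x t ih =>
    simp only [PySem.List.enumerate_cons, List.foldl_cons]
    rw [bStep_abs mc mr x cs n hlt]
    rw [ih (n + 1) (cs ++ (if x.1 ≥ mc ∧ x.2 ≥ mr then [n] else []))
        (by intro a ha
            rcases List.mem_append.mp ha with h | h
            · have := hlt a h; omega
            · by_cases hq : x.1 ≥ mc ∧ x.2 ≥ mr
              · simp [hq] at h; omega
              · simp [hq] at h)]
    have hc : cands mc mr (x :: t) n
        = (if x.1 ≥ mc ∧ x.2 ≥ mr then [n] else []) ++ cands mc mr t (n + 1) := by
      simp only [cands]; split <;> simp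
    rw [hc, List.append_assoc]
    congr 1
    simp; omega

-- finalization: B's epilogue on the abstracted state gives A's answer
theorem finalize_abs (cs : List Int) (n : Int) :
    bFinish (absB cs n) =
      (if (contiguous_groups_py cs).length < 2 then none
       else match PySem.List.pyGet? (contiguous_groups_py cs) 0,
                  PySem.List.pyGet? (contiguous_groups_py cs) (-1) with
         | some g0, some g1 => some (g0, g1)
         | _, _ => none) := by
  cases cs with
  | nil => simp [absB, AS, contiguous_groups_py, bFinish]
  | cons c r =>
    rcases hF : r.foldl cgStep ([], c, c) with ⟨g, s, p⟩
    have hG : contiguous_groups_py (c :: r) = g ++ [(s, p)] := by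
      simp [contiguous_groups_py, hF]
    have hAS : AS (c :: r) = some (g, s, p) := by simp [AS, hF]
    rw [hG]
    have hget0 : PySem.List.pyGet? (g ++ [(s, p)]) 0 = (g ++ [(s, p)]).head? := by
      rw [PySem.List.pyGet?_zero]; cases g <;> simp
    have hget1 : PySem.List.pyGet? (g ++ [(s, p)]) (-1) = (g ++ [(s, p)]).getLast? :=
      PySem.List.pyGet?_neg_one _
    rw [hget0, hget1]
    have hL : (g ++ [(s, p)]).length = g.length + 1 := by simp
    by_cases hopen : p = n - 1
    · have habs : absB (c :: r) n
          = (g.head?, g.getLast?, some s, (g.length : Int), p) := by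
        simp [absB, hAS, hopen]
      rw [habs]
      simp only [bFinish]
      rw [head?_append_singleton, hL]
      have hlast : (g ++ [(s, p)]).getLast? = some (s, p) := by simp
      rw [hlast]
      split_ifs with h1 h2 <;> first | rfl | (exfalso; omega) | (cases g <;> simp)
    · have habs : absB (c :: r) n
          = ((g ++ [(s, p)]).head?, (g ++ [(s, p)]).getLast?, none,
             (g.length : Int) + 1, n - 1) := by
        simp [absB, hAS, hopen]
      rw [habs]
      simp only [bFinish]
      have hlast2 : (g ++ [(s, p)]).getLast? = some (s, p) := by simp
      rw [hL, hlast2]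
      split_ifs with h1 h2 <;> first | rfl | (exfalso; omega) | (cases g <;> simp)

-- ===== VERDICT (by name: the statement is the Claim_ definition above) =====
theorem find_border_band_py_spec : Claim_equal_find_border_band_py := by
  intro counts runs mc mr _
  unfold Spec_find_border_band_py find_border_band_py find_border_band_py_alt
  rw [cands_foldl mc mr (counts.zip runs) 0 []]
  have h0 : (none, none, none, 0, -1) = absB [] 0 := by simp [absB, AS]
  rw [h0, bFold_abs mc mr (counts.zip runs) 0 [] (by simp)]
  rw [List.nil_append, finalize_abs]
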